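-- pv_equiv track=rewrite | github.com/w25536/SWEA | D4/16003. 화면 캡쳐/Main.py | solution
-- ===== SOURCE A (Python) =====
-- def solution(input_str):
--
--     num = int(input_str)
--
--     filenames = []
--     for i in range(1, num+1):
--         filename =str(i) +".png"
--         filenames.append(filename)
--
--
--     filenames.sort(key=lambda x: int(str(x)[0]))
--
--     filenames_str = ' '.join(filenames)
--
--     return filenames_str
-- ===== SOURCE B (Python) =====
-- def solution(input_str):
--     num = int(input_str)
--     buckets = [[] for _ in range(10)]
--     for i in range(1, num + 1):
--         name = str(i) + ".png"
--         buckets[int(name[0])].append(name)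
--     out = []
--     for d in range(1, 10):
--         out.extend(buckets[d])
--     return ' '.join(out)
-- ===== Notes on version B (the rewrite author's own statement) =====
-- stated objective: alternative
-- what changed: Replaces the stable sort of the filenames by their leading digit with a single-pass bucket distribution into ten digit-indexed buckets, then concatenates the buckets in digit order; no sort is performed.
import Mathlib
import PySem

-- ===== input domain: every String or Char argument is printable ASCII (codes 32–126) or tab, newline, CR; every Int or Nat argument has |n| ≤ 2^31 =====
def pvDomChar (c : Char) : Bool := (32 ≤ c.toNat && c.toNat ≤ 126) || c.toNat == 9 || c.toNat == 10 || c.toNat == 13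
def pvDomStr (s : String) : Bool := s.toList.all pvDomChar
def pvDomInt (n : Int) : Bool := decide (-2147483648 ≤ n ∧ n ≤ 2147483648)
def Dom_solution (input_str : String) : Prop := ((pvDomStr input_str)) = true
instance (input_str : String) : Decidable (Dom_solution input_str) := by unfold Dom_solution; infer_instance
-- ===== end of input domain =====

-- B replaces the stable sort by leading digit with a single-pass distribution into ten
-- digit-indexed buckets concatenated in digit order 1..9; same output because the sort
-- key takes only values 1..9 and the sort is stable.

-- int(x[0]) as both Pythons compute it on a filename; exact whenever x is nonempty and
-- starts with a decimal digit, which is the only way it is applied here.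
def pyKey (x : String) : Int :=
  (PySem.Int.ofChars? [(PySem.Str.pyGet? x 0).getD ' ']).getD 0

-- ===== PORT A =====
def solution (input_str : String) : String :=
  match PySem.Int.ofStr? input_str with
  | none => ""   -- int(input_str) raises ValueError; excluded by Pre_solution
  | some num =>
    let filenames := (PySem.List.pyRange 1 (num + 1) 1).foldl
      (fun acc i => acc ++ [PySem.Int.toStr i ++ ".png"]) []
    let sortedNames := PySem.List.sorted filenames pyKey
    PySem.Str.join " " sortedNames

-- ===== PORT B =====
-- one iteration of B's distribution loop: buckets[int(name[0])].append(name)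
def bucketAdd (bs : List (List String)) (i : Int) : List (List String) :=
  let name := PySem.Int.toStr i ++ ".png"
  let d := pyKey name
  PySem.List.pySetD bs d (PySem.List.pyGetD bs d [] ++ [name])

def solution_alt (input_str : String) : String :=
  match PySem.Int.ofStr? input_str with
  | none => ""   -- int(input_str) raises ValueError; excluded by Pre_solution
  | some num =>
    let buckets := (PySem.List.pyRange 1 (num + 1) 1).foldl bucketAdd
      (List.replicate 10 [])
    let out := (PySem.List.pyRange 1 10 1).foldl
      (fun o d => o ++ PySem.List.pyGetD buckets d []) []
    PySem.Str.join " " out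

-- ===== PRECONDITION & SPEC =====
-- Pre_ excludes exactly the strings on which int(input_str) raises ValueError.
def Pre_solution (input_str : String) : Prop :=
  (PySem.Int.ofStr? input_str).isSome = true
instance (input_str : String) : Decidable (Pre_solution input_str) := by
  unfold Pre_solution; infer_instance

def pvWitness_solution : String := "12"

def Spec_solution (input_str : String) (out : String) : Prop := out = solution_alt input_str
instance (input_str : String) (out : String) : Decidable (Spec_solution input_str out) := by
  unfold Spec_solution; infer_instance

-- ===== CLAIM (what is proved, stated in full; the proofs are below) =====
def Claim_equal_solution : Prop := ∀ (input_str : String), Dom_solution input_str → Pre_solution input_str → Spec_solution input_str (solution input_str)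

-- ===== LEMMAS AND PROOFS =====

-- accumulating append of singletons is map
lemma foldl_app_singleton {α β : Type} (f : α → β) :
    ∀ (l : List α) (acc : List β), l.foldl (fun a i => a ++ [f i]) acc = acc ++ l.map f := by
  intro l
  induction l with
  | nil => simp
  | cons x xs ih => intro acc; simp [ih]

-- insertBy places x exactly at the boundary between a "not before" prefix and a "before" suffix
lemma insertBy_boundary {α : Type} (before : α → α → Bool) (x : α) :
    ∀ (L R : List α), (∀ y ∈ L, before x y = false) → (∀ y ∈ R, before x y = true) →
      PySem.List.insertBy before x (L ++ R) = L ++ x :: R := by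
  intro L
  induction L with
  | nil =>
    intro R _ hR
    cases R with
    | nil => simp [PySem.List.insertBy]
    | cons y ys => simp [PySem.List.insertBy, hR y (by simp)]
  | cons a L ih =>
    intro R hL hR
    have ha : before x a = false := hL a (by simp)
    simp [PySem.List.insertBy, ha, ih R (fun y hy => hL y (by simp [hy])) hR]

-- stable insertion sort by a key covered by a strictly increasing digit list
-- equals the concatenation of the per-digit filters
lemma foldl_insertBy_buckets {α : Type} (k : α → Int) :
    ∀ (xs : List α) (digits : List Int), digits.Pairwise (· < ·) →
      (∀ x ∈ xs, k x ∈ digits) →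
      xs.foldl (fun acc x => PySem.List.insertBy (fun a b => decide (k a < k b)) x acc) []
        = digits.flatMap (fun d => xs.filter (fun x => decide (k x = d))) := by
  intro xs
  induction xs using List.reverseRecOn with
  | nil => intro digits _ _; simp
  | append_singleton ys x ih =>
    intro digits hpw hcov
    have hx : k x ∈ digits := hcov x (by simp)
    obtain ⟨D1, D2, hD⟩ := List.append_of_mem hx
    subst hD
    have hpw' := hpw
    rw [List.pairwise_append] at hpw'
    obtain ⟨_, hpw2, hcross⟩ := hpw'
    rw [List.pairwise_cons] at hpw2
    have hD1lt : ∀ d ∈ D1, d < k x := fun d hd => hcross d hd (k x) (by simp)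
    have hD2gt : ∀ d ∈ D2, k x < d := hpw2.1
    rw [List.foldl_append, ih _ hpw (fun y hy => hcov y (by simp [hy]))]
    rw [List.flatMap_append, List.flatMap_cons]
    set g : Int → List α := fun d => ys.filter (fun y => decide (k y = d)) with hg
    have hL : ∀ y ∈ D1.flatMap g ++ g (k x), (fun a b => decide (k a < k b)) x y = false := by
      intro y hy
      simp only [List.mem_append, List.mem_flatMap, hg, List.mem_filter,
        decide_eq_true_eq] at hy
      rcases hy with ⟨d, hd, _, hkey⟩ | ⟨_, hkey⟩
      · have := hD1lt d hd
        simp only [decide_eq_false_iff_not]; omega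
      · simp only [decide_eq_false_iff_not]; omega
    have hR : ∀ y ∈ D2.flatMap g, (fun a b => decide (k a < k b)) x y = true := by
      intro y hy
      simp only [List.mem_flatMap, hg, List.mem_filter, decide_eq_true_eq] at hy
      obtain ⟨d, hd, _, hkey⟩ := hy
      have := hD2gt d hd
      simp only [decide_eq_true_eq]; omega
    have hb := insertBy_boundary (fun a b => decide (k a < k b)) x
      (D1.flatMap g ++ g (k x)) (D2.flatMap g) hL hR
    simp only [List.foldl_cons, List.foldl_nil]
    rw [← List.append_assoc, hb]
    have hfilter : ∀ d : Int, (ys ++ [x]).filter (fun y => decide (k y = d))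
        = g d ++ if k x = d then [x] else [] := by
      intro d
      rw [List.filter_append, hg]
      by_cases h : k x = d <;> simp [h]
    have hside : ∀ (l : List Int), (∀ d ∈ l, k x ≠ d) →
        (l.flatMap fun d => (ys ++ [x]).filter (fun y => decide (k y = d))) = l.flatMap g := by
      intro l hl
      induction l with
      | nil => simp
      | cons d l ihl =>
        rw [List.flatMap_cons, List.flatMap_cons, hfilter d,
          if_neg (hl d (by simp)), ihl (fun e he => hl e (by simp [he]))]
        simp
    rw [List.flatMap_append, List.flatMap_cons]
    rw [hside D1 (fun d hd => by have := hD1lt d hd; omega),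
      hside D2 (fun d hd => by have := hD2gt d hd; omega), hfilter (k x), if_pos rfl]
    simp

-- every digit char of a positive number starts with a nonzero digit
lemma toDigitsCore_head :
    ∀ (fuel n : ℕ) (ds : List Char), 1 ≤ n → n < fuel →
      ∃ c t, Nat.toDigitsCore 10 fuel n ds = c :: t ∧
        c ∈ (['1','2','3','4','5','6','7','8','9'] : List Char) := by
  intro fuel
  induction fuel with
  | zero => intro n ds h1 h2; omega
  | succ fuel ih =>
    intro n ds h1 h2
    simp only [Nat.toDigitsCore]
    by_cases h : n / 10 = 0
    · simp only [h]
      refine ⟨(n % 10).digitChar, ds, rfl, ?_⟩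
      have : n ≤ 9 := by omega
      interval_cases n <;> decide
    · simp only [h]
      exact ih (n / 10) _ (Nat.pos_of_ne_zero h)
        (by have := Nat.div_lt_self (by omega : 0 < n) (by omega : 1 < 10); omega)

lemma toChars_pos (i : Int) (h : 1 ≤ i) :
    ∃ c t, PySem.Int.toChars i = c :: t ∧
      c ∈ (['1','2','3','4','5','6','7','8','9'] : List Char) := by
  have hnn : ¬ i < 0 := by omega
  have h1 : 1 ≤ i.toNat := by omega
  simp only [PySem.Int.toChars, if_neg hnn, Nat.toDigits]
  exact toDigitsCore_head (i.toNat + 1) i.toNat [] h1 (by omega)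

-- the key of every generated filename is its leading digit, a value in 1..9
lemma pyKey_mem (i : Int) (h : 1 ≤ i) :
    pyKey (PySem.Int.toStr i ++ ".png") ∈ ([1,2,3,4,5,6,7,8,9] : List Int) := by
  obtain ⟨c, t, hct, hc⟩ := toChars_pos i h
  have hlist : (PySem.Int.toStr i ++ ".png").toList = c :: (t ++ ".png".toList) := by
    rw [String.toList_append, PySem.Int.toList_toStr, hct]; simp
  unfold pyKey
  have : PySem.Str.pyGet? (PySem.Int.toStr i ++ ".png") 0 = some c := by
    simp [hlist]
  rw [this]
  fin_cases hc <;> decide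

-- getD through a set at the same / at another index
lemma getD_set_self {α : Type} (l : List α) (n : Nat) (a d : α) (h : n < l.length) :
    (l.set n a).getD n d = a := by
  simp [List.getD_eq_getElem?_getD, h]

lemma getD_set_ne {α : Type} (l : List α) (n m : Nat) (a d : α) (h : n ≠ m) :
    (l.set n a).getD m d = l.getD m d := by
  simp [List.getD_eq_getElem?_getD, List.getElem?_set_ne h]

-- B's distribution loop: after folding over l (all elements ≥ 1), bucket d holds its
-- initial content followed by exactly the filenames whose key is d, in order
lemma buckets_invariant :
    ∀ (l : List Int), (∀ i ∈ l, 1 ≤ i) →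
      ∀ (bs : List (List String)), bs.length = 10 →
        (l.foldl bucketAdd bs).length = 10 ∧
        ∀ d : Int, 1 ≤ d → d ≤ 9 →
          PySem.List.pyGetD (l.foldl bucketAdd bs) d []
            = PySem.List.pyGetD bs d []
              ++ (l.map (fun i => PySem.Int.toStr i ++ ".png")).filter
                  (fun x => decide (pyKey x = d)) := by
  intro l
  induction l with
  | nil => intro _ bs hbs; exact ⟨hbs, by simp⟩
  | cons x xs ih =>
    intro hl bs hbs
    have hx1 : 1 ≤ x := hl x (by simp)
    have hk19 : 1 ≤ pyKey (PySem.Int.toStr x ++ ".png")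
        ∧ pyKey (PySem.Int.toStr x ++ ".png") ≤ 9 := by
      have hk := pyKey_mem x hx1
      simp only [List.mem_cons, List.not_mem_nil, or_false] at hk
      rcases hk with h|h|h|h|h|h|h|h|h <;> omega
    have hstep : bucketAdd bs x
        = bs.set (pyKey (PySem.Int.toStr x ++ ".png")).toNat
            (bs.getD (pyKey (PySem.Int.toStr x ++ ".png")).toNat []
              ++ [PySem.Int.toStr x ++ ".png"]) := by
      simp only [bucketAdd]
      rw [PySem.List.pySetD_of_nonneg _ _ (by omega),
        PySem.List.pyGetD_of_nonneg _ _ (by omega)]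
    have hlen' : (bucketAdd bs x).length = 10 := by rw [hstep]; simp [hbs]
    obtain ⟨hfl, hfd⟩ := ih (fun i hi => hl i (by simp [hi])) (bucketAdd bs x) hlen'
    refine ⟨by simpa using hfl, ?_⟩
    intro d hd1 hd9
    simp only [List.foldl_cons, List.map_cons, List.filter_cons]
    rw [hfd d hd1 hd9]
    have hbucket : PySem.List.pyGetD (bucketAdd bs x) d []
        = PySem.List.pyGetD bs d []
          ++ (if decide (pyKey (PySem.Int.toStr x ++ ".png") = d) = true
              then [PySem.Int.toStr x ++ ".png"] else []) := by
      rw [PySem.List.pyGetD_of_nonneg _ _ (by omega : (0:Int) ≤ d),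
        PySem.List.pyGetD_of_nonneg _ _ (by omega : (0:Int) ≤ d), hstep]
      by_cases hkd : pyKey (PySem.Int.toStr x ++ ".png") = d
      · rw [hkd, getD_set_self _ _ _ _ (by omega : d.toNat < bs.length)]
        simp
      · have hne : (pyKey (PySem.Int.toStr x ++ ".png")).toNat ≠ d.toNat := by omega
        rw [getD_set_ne _ _ _ _ _ hne]
        simp [hkd]
    rw [hbucket]
    by_cases hkd : pyKey (PySem.Int.toStr x ++ ".png") = d <;>
      simp [hkd, List.append_assoc]

-- accumulating append of a function of the index is flatMap
lemma foldl_append_fn {α β : Type} (g : β → List α) :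
    ∀ (ds : List β) (acc : List α),
      ds.foldl (fun o d => o ++ g d) acc = acc ++ ds.flatMap g := by
  intro ds
  induction ds with
  | nil => simp
  | cons d ds ih => intro acc; rw [List.foldl_cons, ih, List.flatMap_cons, List.append_assoc]

-- the initial buckets are all empty
lemma pyGetD_replicate_empty (d : Int) (h1 : 1 ≤ d) (h9 : d ≤ 9) :
    PySem.List.pyGetD (List.replicate 10 ([] : List String)) d [] = [] := by
  interval_cases d <;> decide

-- the value returned on the some-branch is the same for both ports
lemma branch_eq (num : Int) :
    PySem.Str.join " " (PySem.List.sorted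
        ((PySem.List.pyRange 1 (num + 1) 1).foldl
          (fun acc i => acc ++ [PySem.Int.toStr i ++ ".png"]) []) pyKey)
      = PySem.Str.join " "
          ((PySem.List.pyRange 1 10 1).foldl
            (fun o d => o ++ PySem.List.pyGetD
              ((PySem.List.pyRange 1 (num + 1) 1).foldl bucketAdd (List.replicate 10 [])) d [])
            []) := by
  congr 1
  have hmem : ∀ i ∈ PySem.List.pyRange 1 (num + 1) 1, (1:Int) ≤ i :=
    fun i hi => (PySem.List.mem_pyRange_one.mp hi).1
  obtain ⟨_, hbuck⟩ := buckets_invariant _ hmem (List.replicate 10 []) (by simp)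
  -- A side: stable sort = concatenation of per-digit filters
  rw [foldl_app_singleton, List.nil_append, PySem.List.sorted_eq_foldl_insertBy,
    foldl_insertBy_buckets pyKey _ ([1,2,3,4,5,6,7,8,9]) (by decide)
      (fun x hx => by
        obtain ⟨i, hi, rfl⟩ := List.mem_map.mp hx
        exact pyKey_mem i (hmem i hi))]
  -- B side: concatenation of the buckets
  rw [foldl_append_fn, List.nil_append,
    show PySem.List.pyRange 1 10 1 = [1,2,3,4,5,6,7,8,9] from by decide]
  simp only [List.flatMap_def]
  congr 1
  apply List.map_congr_left
  intro d hd
  have hd19 : 1 ≤ d ∧ d ≤ 9 := by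
    simp only [List.mem_cons, List.not_mem_nil, or_false] at hd
    rcases hd with h|h|h|h|h|h|h|h|h <;> omega
  rw [hbuck d hd19.1 hd19.2, pyGetD_replicate_empty d hd19.1 hd19.2, List.nil_append]

-- ===== VERDICT (by name: the statement is the Claim_ definition above) =====
theorem solution_spec : Claim_equal_solution := by
  intro s _ _
  unfold Spec_solution solution solution_alt
  cases h : PySem.Int.ofStr? s with
  | none => rfl
  | some num => exact branch_eq num
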